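-- pv_equiv track=rewrite | github.com/luke-a-thompson/Stochastax | stochastax/hopf_algebras/bck_trees.py | _bh_successor
-- ===== SOURCE A (Python) =====
-- def _bh_successor(levels: list[int]) -> list[int]:
--     """Beyer-Hedetniemi successor for canonical level sequences (1-based depths)."""
--     n = len(levels)
--
--     # p = largest index with level > 2  (1-based depths; minimal sequence has no >2)
--     p = -1
--     for i in range(n - 1, -1, -1):
--         if levels[i] > 2:
--             p = i
--             break
--     if p == -1:
--         # Already at the minimal sequence [1, 2, 2, ..., 2]
--         return levels[:]
--
--     # q = parent position of node p: last i < p with level == levels[p] - 1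
--     parent_level = levels[p] - 1
--     q = -1
--     for i in range(p - 1, -1, -1):
--         if levels[i] == parent_level:
--             q = i
--             break
--
--     # Period length and repeat-copy
--     k = p - q
--     S = levels[:]
--     for i in range(p, n):
--         S[i] = S[i - k]  # copy from S (progressively), not from the old array
--     return S
-- ===== SOURCE B (Python) =====
-- def _bh_successor(levels: list[int]) -> list[int]:
--     """Beyer-Hedetniemi successor: one fused backward scan finds p and its parent q,
--     then the periodic suffix is grown by geometric doubling of slices instead of an
--     element-by-element copy."""
--     n = len(levels)
--     # single backward scan: first locate p (last level > 2), then keep walking left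
--     # in the same pass to find its parent q (last index < p at level levels[p] - 1)
--     p = q = -1
--     for i in range(n - 1, -1, -1):
--         if p == -1:
--             if levels[i] > 2:
--                 p = i
--         elif levels[i] == levels[p] - 1:
--             q = i
--             break
--     if p == -1:
--         return levels[:]
--     # seed one copy of the period, then double the periodic tail until it covers n
--     s = levels[:p] + [levels[j] for j in range(q, p)]
--     t = p - q
--     while len(s) < n:
--         s += s[-t:]
--         t *= 2
--     return s[:n]
-- ===== Notes on version B (the rewrite author's own statement) =====
-- stated objective: alternative
-- what changed: A's two separate backward break-scans become one fused backward pass that finds p and then its parent q in the same walk, and A's element-by-element progressive copy S[i]=S[i-k] over the whole suffix is replaced by seeding one period block and geometrically doubling the periodic tail with whole-slice appends before truncating to n.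
import Mathlib
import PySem

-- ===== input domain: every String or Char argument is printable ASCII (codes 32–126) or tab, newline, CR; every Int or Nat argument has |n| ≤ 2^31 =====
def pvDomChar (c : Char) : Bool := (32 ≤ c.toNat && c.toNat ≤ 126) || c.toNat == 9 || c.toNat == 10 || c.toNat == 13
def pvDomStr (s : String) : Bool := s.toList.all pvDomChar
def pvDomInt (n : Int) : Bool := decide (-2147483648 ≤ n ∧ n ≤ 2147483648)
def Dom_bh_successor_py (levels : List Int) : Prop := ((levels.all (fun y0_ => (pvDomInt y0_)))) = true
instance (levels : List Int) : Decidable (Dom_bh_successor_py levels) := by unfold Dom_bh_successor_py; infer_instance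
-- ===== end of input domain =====

-- B fuses A's two backward break-scans into one backward pass finding p and its parent q together,
-- and replaces A's element-by-element progressive copy S[i]=S[i-k] by seeding one period block and
-- geometrically doubling the periodic tail with whole-slice appends, then truncating to n.
-- A copies its argument before mutating it, so there is no observable side effect to mirror.

-- ===== PORT A =====
-- 'for i in range(m, -1, -1): if pred(levels[i]): r = i; break' (shared shape of A's two scans);
-- the indices come from the countdown range, so every pyGetD is in range and its default 0 is never read
def bhBreakFind (levels : List Int) (pred : Int → Bool) : List Int → Int
  | [] => -1
  | i :: rest => if pred (PySem.List.pyGetD levels i 0) then i else bhBreakFind levels pred rest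

def bh_successor_py (levels : List Int) : List Int :=
  let n : Int := levels.length
  let p := bhBreakFind levels (fun v => v > 2) (PySem.List.pyRange (n - 1) (-1) (-1))
  if p = -1 then levels
  else
    let parent_level := PySem.List.pyGetD levels p 0 - 1
    let q := bhBreakFind levels (fun v => v == parent_level) (PySem.List.pyRange (p - 1) (-1) (-1))
    let k := p - q
    (PySem.List.pyRange p n 1).foldl
      (fun S i => PySem.List.pySetD S i (PySem.List.pyGetD S (i - k) 0)) levels

-- ===== PORT B =====
-- B's single backward loop: while p is -1, look for a level > 2; afterwards look for the parent
-- level and break (return) on the first hit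
def bhScanPQ (levels : List Int) : List Int → Int × Int → Int × Int
  | [], pq => pq
  | i :: rest, (p, q) =>
    if p = -1 then
      if PySem.List.pyGetD levels i 0 > 2 then bhScanPQ levels rest (i, q)
      else bhScanPQ levels rest (p, q)
    else if PySem.List.pyGetD levels i 0 = PySem.List.pyGetD levels p 0 - 1 then (p, i)
    else bhScanPQ levels rest (p, q)

-- B's 'while len(s) < n: s += s[-t:]; t *= 2', with fuel n: each iteration grows s by at least one
-- element on the inputs B reaches it with, so n iterations always suffice
def bhDouble (n : Nat) : Nat → List Int → Int → List Int
  | 0, s, _ => s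
  | fuel + 1, s, t =>
    if s.length < n then
      bhDouble n fuel (s ++ PySem.List.slice s (some (-t)) none) (t * 2)
    else s

def bh_successor_py_alt (levels : List Int) : List Int :=
  let n : Int := levels.length
  let pq := bhScanPQ levels (PySem.List.pyRange (n - 1) (-1) (-1)) (-1, -1)
  let p := pq.1
  let q := pq.2
  if p = -1 then levels
  else
    let s := PySem.List.slice levels none (some p)
               ++ (PySem.List.pyRange q p 1).map (fun j => PySem.List.pyGetD levels j 0)
    PySem.List.slice (bhDouble levels.length levels.length s (p - q)) none (some n)

-- ===== PRECONDITION & SPEC =====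
def Spec_bh_successor_py (levels : List Int) (out : List Int) : Prop := out = bh_successor_py_alt levels
instance (levels : List Int) (out : List Int) : Decidable (Spec_bh_successor_py levels out) := by unfold Spec_bh_successor_py; infer_instance

-- ===== CLAIM (what is proved, stated in full; the proofs are below) =====
def Claim_equal_bh_successor_py : Prop := ∀ (levels : List Int), Dom_bh_successor_py levels → Spec_bh_successor_py levels (bh_successor_py levels)

-- ===== LEMMAS AND PROOFS =====

lemma bhGetElem?_take {α : Type} (l : List α) (a b : Nat) (h : b < a) : (l.take a)[b]? = l[b]? := by
  exact List.getElem?_take_of_lt h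

lemma bhSetBoundary {α : Type} (A B : List α) (v : α) (i : Nat) (hi : i = A.length) :
    (A ++ B).set i v = A ++ B.set 0 v := by
  subst hi; simp

-- the backward break-scan returns -1 or an index below m
lemma bhScan_spec (levels : List Int) (pred : Int → Bool) (m : Nat) :
    (bhBreakFind levels pred (PySem.List.pyRange ((m : Int) - 1) (-1) (-1)) = -1)
    ∨ (∃ jr : Nat, bhBreakFind levels pred (PySem.List.pyRange ((m : Int) - 1) (-1) (-1)) = (jr : Int)
        ∧ jr < m) := by
  induction m with
  | zero => left; simp [PySem.List.pyRange_neg_one_eq_nil, bhBreakFind]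
  | succ m ih =>
    have hr : PySem.List.pyRange ((m : Int) + 1 - 1) (-1) (-1)
        = (m : Int) :: PySem.List.pyRange ((m : Int) - 1) (-1) (-1) := by
      have := PySem.List.pyRange_neg_one_cons (a := (m : Int)) (b := -1) (by omega)
      simpa using this
    push_cast
    rw [hr]
    simp only [bhBreakFind]
    by_cases hp : pred (PySem.List.pyGetD levels (m : Int) 0) = true
    · right; exact ⟨m, by rw [if_pos hp], by omega⟩
    · rcases ih with h | ⟨jr, hj, hjm⟩
      · left; rw [if_neg hp]; exact h
      · right; exact ⟨jr, by rw [if_neg hp]; exact hj, by omega⟩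

-- the progressive fill S[i] = S[i-k] for i in range(p, n) equals the closed-form period tiling
lemma bhFill_eq (levels : List Int) (pN : Nat) (q : Int)
    (hp : pN < levels.length) (hq0 : -1 ≤ q) (hq1 : q < (pN : Int)) :
    (PySem.List.pyRange (pN : Int) (levels.length : Int) 1).foldl
        (fun S i => PySem.List.pySetD S i (PySem.List.pyGetD S (i - ((pN : Int) - q)) 0)) levels
      = levels.take pN
        ++ (PySem.List.pyRange (pN : Int) (levels.length : Int) 1).map
             (fun i => PySem.List.pyGetD
               ((PySem.List.pyRange q (pN : Int) 1).map (fun j => PySem.List.pyGetD levels j 0))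
               (PySem.Int.mod (i - (pN : Int)) ((pN : Int) - q)) 0) := by
  set k : Int := (pN : Int) - q with hkdef
  have hk : 0 < k := by omega
  set f : Int → Int := fun j => PySem.List.pyGetD levels j 0 with hf
  set period : List Int := (PySem.List.pyRange q (pN : Int) 1).map f with hper
  set g : Int → Int := fun i => PySem.List.pyGetD period (PySem.Int.mod (i - (pN : Int)) k) 0 with hg
  set T : List Int := levels.take pN ++ (PySem.List.pyRange (pN : Int) (levels.length : Int) 1).map g with hT
  have htakelen : (levels.take pN).length = pN := by simp [hp.le]
  have hTlen : T.length = levels.length := by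
    rw [hT, List.length_append, htakelen, List.length_map, PySem.List.length_pyRange_one]
    omega
  have hTsome : ∀ m : Nat, m < levels.length → T[m]? = some (T.getD m 0) := by
    intro m hm
    have hm' : m < T.length := by omega
    rw [List.getD_eq_getElem?_getD, List.getElem?_eq_getElem hm']
    rfl
  -- element of T in the untouched prefix
  have hTget1 : ∀ e : Nat, e < pN → T.getD e 0 = levels.getD e 0 := by
    intro e he
    rw [List.getD_eq_getElem?_getD, List.getD_eq_getElem?_getD, hT,
        List.getElem?_append_left (by rw [htakelen]; omega),
        bhGetElem?_take levels pN e he]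
  -- element of T in the tiled suffix
  have hTget2 : ∀ d : Nat, pN + d < levels.length →
      T.getD (pN + d) 0 = PySem.List.pyGetD period (PySem.Int.mod (d : Int) k) 0 := by
    intro d hd
    rw [List.getD_eq_getElem?_getD, hT, List.getElem?_append_right (by rw [htakelen]; omega)]
    rw [htakelen, show pN + d - pN = d from by omega, List.getElem?_map]
    have hr : (PySem.List.pyRange (pN : Int) (levels.length : Int) 1)[d]?
        = some ((pN : Int) + d) := by
      rw [List.getElem?_eq_getElem (by rw [PySem.List.length_pyRange_one]; omega)]
      rw [PySem.List.getElem_pyRange_one]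
    rw [hr]
    simp only [Option.map_some, Option.getD_some, hg]
    rw [show ((pN : Int) + d - pN) = (d : Int) from by ring]
  -- T.take pN is the untouched prefix
  have hTtakep : T.take pN = levels.take pN := by
    rw [hT]; exact List.take_left' htakelen
  -- the loop invariant: after filling indices pN..pN+d-1 the list is T on the prefix, levels on the rest
  have inv : ∀ d : Nat, pN + d ≤ levels.length →
      (PySem.List.pyRange (pN : Int) ((pN : Int) + (d : Int)) 1).foldl
          (fun S i => PySem.List.pySetD S i (PySem.List.pyGetD S (i - k) 0)) levels
        = T.take (pN + d) ++ levels.drop (pN + d) := by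
    intro d
    induction d with
    | zero =>
      intro _
      rw [show ((pN : Int) + ((0 : Nat) : Int)) = (pN : Int) from by simp]
      rw [PySem.List.pyRange_one_eq_nil le_rfl]
      simp only [List.foldl_nil, Nat.add_zero]
      rw [hTtakep, List.take_append_drop]
    | succ d ihd =>
      intro hd1
      have ih := ihd (by omega)
      have hpd : pN + d < levels.length := by omega
      have hsplit : PySem.List.pyRange (pN : Int) ((pN : Int) + ((d : Int) + 1)) 1
          = PySem.List.pyRange (pN : Int) ((pN : Int) + d) 1 ++ [(pN : Int) + d] := by
        have := PySem.List.pyRange_one_succ_right (a := (pN : Int)) (b := (pN : Int) + d) (by omega)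
        rw [show ((pN : Int) + ((d : Int) + 1)) = ((pN : Int) + d) + 1 from by ring]
        exact this
      push_cast
      rw [hsplit, List.foldl_append, ih]
      simp only [List.foldl_cons, List.foldl_nil]
      set S : List Int := T.take (pN + d) ++ levels.drop (pN + d) with hS
      -- the value read in this step is exactly the tile value T[pN+d]
      have hv : PySem.List.pyGetD S ((pN : Int) + d - k) 0 = T.getD (pN + d) 0 := by
        by_cases he : (0 : Int) ≤ (pN : Int) + d - k
        · -- in-range read from the already-correct prefix of S, i.e. from T
          set e : Nat := ((pN : Int) + d - k).toNat with hedef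
          have he2 : ((pN : Int) + d - k) = (e : Int) := by omega
          have he3 : e < pN + d := by omega
          have he4 : e < levels.length := by omega
          have h5 : S[e]? = T[e]? := by
            rw [hS, List.getElem?_append_left (by rw [List.length_take]; omega)]
            exact bhGetElem?_take T (pN + d) e he3
          have hSe : PySem.List.pyGetD S ((pN : Int) + d - k) 0 = T.getD e 0 := by
            rw [he2]
            have base : PySem.List.pyGetD S ((e : Nat) : Int) 0 = S.getD e 0 := by simp [pysem]
            rw [base, List.getD_eq_getElem?_getD, h5, hTsome e he4]
            rfl
          rw [hSe]
          by_cases hep : e < pN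
          · -- read from the untouched prefix: levels[e] = period[d] since d < k here
            have hdk : (d : Int) < k := by omega
            have hmodd : PySem.Int.mod (d : Int) k = (d : Int) := by
              rw [PySem.Int.mod_eq_emod_of_pos hk]
              exact Int.emod_eq_of_lt (by omega) hdk
            rw [hTget1 e hep, hTget2 d hpd, hmodd, hper,
                PySem.List.pyGetD_map_pyRange_one f q (pN : Int) d 0 (by omega),
                show q + (d : Int) = (e : Int) from by omega]
            simp [hf, pysem, List.getD_eq_getElem?_getD]
          · -- read from the already-tiled region: same residue modulo k
            have hted : T.getD e 0
                = PySem.List.pyGetD period (PySem.Int.mod ((e - pN : Nat) : Int) k) 0 := by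
              have h7 := hTget2 (e - pN) (by omega)
              rw [show pN + (e - pN) = e from by omega] at h7
              exact h7
            rw [hted, hTget2 d hpd]
            congr 1
            rw [show ((e - pN : Nat) : Int) = (d : Int) - k from by omega,
                PySem.Int.mod_eq_emod_of_pos hk, PySem.Int.mod_eq_emod_of_pos hk]
            exact Int.sub_emod_right (d : Int) k
        · -- the only possible negative read is S[-1], with q = -1 and d = 0: both sides are levels[-1]
          have hq : q = -1 := by omega
          have hd0 : d = 0 := by omega
          subst hd0
          have hSlev : S = levels := by
            rw [hS]
            simp only [Nat.add_zero]
            rw [hTtakep, List.take_append_drop]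
          rw [hSlev, show ((pN : Int) + ((0 : Nat) : Int) - k) = (-1 : Int) from by omega]
          rw [hTget2 0 (by omega)]
          have hmod0 : PySem.Int.mod ((0 : Nat) : Int) k = (0 : Int) := by
            rw [PySem.Int.mod_eq_emod_of_pos hk]; simp
          rw [hmod0]
          have h00 := PySem.List.pyGetD_map_pyRange_one f q (pN : Int) 0 0 (by omega)
          have h00' : PySem.List.pyGetD ((PySem.List.pyRange q (pN : Int) 1).map f) (0 : Int) 0
              = f q := by simpa using h00
          rw [hper, h00', hq]
      -- performing the write extends the correct prefix by one
      rw [show pN + (d + 1) = pN + d + 1 from by omega]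
      rw [hv, show ((pN : Int) + (d : Int)) = ((pN + d : Nat) : Int) from by push_cast; ring,
          PySem.List.pySetD_natCast]
      have hlt : (T.take (pN + d)).length = pN + d := by rw [List.length_take]; omega
      rw [hS, bhSetBoundary (T.take (pN + d)) (levels.drop (pN + d)) _ _ hlt.symm]
      rw [List.drop_eq_getElem_cons hpd, List.set_cons_zero]
      rw [List.take_add_one, hTsome (pN + d) hpd]
      simp
  -- instantiate the invariant at the end of the loop
  have hfin := inv (levels.length - pN) (by omega)
  have hc : ((pN : Int) + ((levels.length - pN : Nat) : Int)) = (levels.length : Int) := by omega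
  rw [hc] at hfin
  rw [hfin, show pN + (levels.length - pN) = levels.length from by omega,
      List.drop_length, List.append_nil, List.take_of_length_le (by omega)]

-- phase 2 of B's fused scan (p already found) is A's parent break-scan
lemma bhScanPQ_phase2 (levels : List Int) (p : Int) (hp : p ≠ -1) (L : List Int) :
    bhScanPQ levels L (p, -1)
      = (p, bhBreakFind levels (fun v => v == PySem.List.pyGetD levels p 0 - 1) L) := by
  induction L with
  | nil => simp [bhScanPQ, bhBreakFind]
  | cons i rest ih =>
    simp only [bhScanPQ, bhBreakFind, if_neg hp]
    by_cases h : PySem.List.pyGetD levels i 0 = PySem.List.pyGetD levels p 0 - 1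
    · simp [h]
    · simp only [if_neg h, ih]
      rw [if_neg (by simpa using h)]

-- B's fused backward scan over range(m-1,-1,-1) computes exactly A's two break-scan results
lemma bhScanPQ_eq (levels : List Int) (m : Nat) :
    bhScanPQ levels (PySem.List.pyRange ((m : Int) - 1) (-1) (-1)) (-1, -1)
      = (let p := bhBreakFind levels (fun v => v > 2) (PySem.List.pyRange ((m : Int) - 1) (-1) (-1));
         (p, if p = -1 then -1
             else bhBreakFind levels (fun v => v == PySem.List.pyGetD levels p 0 - 1)
               (PySem.List.pyRange (p - 1) (-1) (-1)))) := by
  induction m with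
  | zero => simp [PySem.List.pyRange_neg_one_eq_nil, bhScanPQ, bhBreakFind]
  | succ m ih =>
    have hr : PySem.List.pyRange ((m : Int) + 1 - 1) (-1) (-1)
        = (m : Int) :: PySem.List.pyRange ((m : Int) - 1) (-1) (-1) := by
      have := PySem.List.pyRange_neg_one_cons (a := (m : Int)) (b := -1) (by omega)
      simpa using this
    push_cast
    rw [hr]
    by_cases h : PySem.List.pyGetD levels (m : Int) 0 > 2
    · have hb : (fun v => (v > 2 : Bool)) (PySem.List.pyGetD levels (m : Int) 0) = true := by
        simpa using h
      simp only [bhScanPQ, bhBreakFind, if_pos h, hb, if_pos]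
      have hm : ((m : Int)) ≠ -1 := by omega
      rw [bhScanPQ_phase2 levels (m : Int) hm]
      simp [hm]
    · have hb : (fun v => (v > 2 : Bool)) (PySem.List.pyGetD levels (m : Int) 0) = false := by
        simpa using h
      simp only [bhScanPQ, bhBreakFind, if_neg h, hb, Bool.false_eq_true,
        if_neg (by simp : ¬False)]
      exact ih

-- one period-length block of the tiling map is the period itself
lemma bhTileBlock (period : List Int) (k : Nat) (hk : period.length = k)
    (p a : Int) (ha : ((k : Int)) ∣ (a - p)) :
    (PySem.List.pyRange a (a + (k : Int)) 1).map
        (fun i => PySem.List.pyGetD period (PySem.Int.mod (i - p) (k : Int)) 0) = period := by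
  apply List.ext_getElem
  · rw [List.length_map, PySem.List.length_pyRange_one]; omega
  · intro j hj1 hj2
    have hjk : j < k := by omega
    rw [List.getElem_map, PySem.List.getElem_pyRange_one]
    have hkpos : (0 : Int) < (k : Int) := by omega
    have hmod : PySem.Int.mod (a + (j : Int) - p) (k : Int) = (j : Int) := by
      rw [PySem.Int.mod_eq_emod_of_pos hkpos]
      obtain ⟨c, hc⟩ := ha
      have h2 : a + (j : Int) - p = (j : Int) + (k : Int) * c := by
        have : a - p = (k : Int) * c := hc
        omega
      rw [h2, Int.add_mul_emod_self_left]
      exact Int.emod_eq_of_lt (by omega) (by omega)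
    rw [hmod, PySem.List.pyGetD_natCast, List.getD_eq_getElem?_getD,
        List.getElem?_eq_getElem hj2]
    rfl

-- the tiling map over m period blocks is the period repeated m times
lemma bhTileRep (period : List Int) (k : Nat) (hk : period.length = k)
    (p : Int) (m : Nat) :
    (PySem.List.pyRange p (p + ((m * k : Nat) : Int)) 1).map
        (fun i => PySem.List.pyGetD period (PySem.Int.mod (i - p) (k : Int)) 0)
      = (List.replicate m period).flatten := by
  induction m with
  | zero => simp [PySem.List.pyRange_one_eq_nil]
  | succ m ih =>
    have hmono : ((m * k : Nat) : Int) ≤ (((m + 1) * k : Nat) : Int) := by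
      exact_mod_cast Nat.mul_le_mul_right k (by omega)
    have hsplit := PySem.List.pyRange_one_append p (p + ((m * k : Nat) : Int))
      (p + (((m + 1) * k : Nat) : Int)) (by omega) (by omega)
    rw [hsplit, List.map_append, ih]
    have hend : p + (((m + 1) * k : Nat) : Int) = (p + ((m * k : Nat) : Int)) + (k : Int) := by
      push_cast; ring
    rw [hend, bhTileBlock period k hk p (p + ((m * k : Nat) : Int)) ⟨(m : Int), by push_cast; ring⟩]
    rw [show m + 1 = m + 1 from rfl, List.replicate_add, List.flatten_append]
    simp

-- truncating the prefix plus m full period blocks to n elements is the tiling map up to n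
lemma bhTruncRep (pre period : List Int) (k pN n m : Nat) (hk : period.length = k)
    (hpre : pre.length = pN) (hpn : pN ≤ n) (hn : n ≤ pN + m * k) :
    (pre ++ (List.replicate m period).flatten).take n
      = pre ++ (PySem.List.pyRange (pN : Int) (n : Int) 1).map
          (fun i => PySem.List.pyGetD period (PySem.Int.mod (i - (pN : Int)) (k : Int)) 0) := by
  rw [List.take_append, List.take_of_length_le (by omega), hpre]
  congr 1
  rw [← bhTileRep period k hk (pN : Int) m, ← List.map_take]
  congr 1
  apply List.ext_getElem
  · rw [List.length_take, PySem.List.length_pyRange_one, PySem.List.length_pyRange_one]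
    omega
  · intro j h1 h2
    rw [List.getElem_take, PySem.List.getElem_pyRange_one, PySem.List.getElem_pyRange_one]

-- the doubling loop keeps the state of the form 'prefix ++ m period blocks' and ends covering n
lemma bhDouble_inv (pre period : List Int) (k pN n : Nat) (hk : period.length = k) (hk1 : 1 ≤ k)
    (hpre : pre.length = pN) :
    ∀ (fuel m : Nat), 1 ≤ m → n ≤ pN + m * k + fuel →
      ∃ m', n ≤ pN + m' * k ∧
        bhDouble n fuel (pre ++ (List.replicate m period).flatten) ((m * k : Nat) : Int)
          = pre ++ (List.replicate m' period).flatten := by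
  intro fuel
  induction fuel with
  | zero =>
    intro m hm hle
    exact ⟨m, by omega, by simp [bhDouble]⟩
  | succ fuel ih =>
    intro m hm hle
    have hmk1 : 1 ≤ m * k := Nat.mul_pos (by omega) (by omega)
    have hlen : (pre ++ (List.replicate m period).flatten).length = pN + m * k := by
      simp [List.length_flatten, List.map_replicate, List.sum_replicate, hk, hpre, smul_eq_mul]
    by_cases hlt : pN + m * k < n
    · have hslice : PySem.List.slice (pre ++ (List.replicate m period).flatten)
          (some (-((m * k : Nat) : Int))) none = (List.replicate m period).flatten := by
        rw [PySem.List.slice_from_neg_natCast _ _ hmk1, hlen,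
            show pN + m * k - m * k = pN from by omega, ← hpre, List.drop_left]
      simp only [bhDouble, hlen, if_pos hlt, hslice]
      have hre : pre ++ (List.replicate m period).flatten ++ (List.replicate m period).flatten
          = pre ++ (List.replicate (m + m) period).flatten := by
        rw [List.replicate_add, List.flatten_append, List.append_assoc]
      have hca : ((m * k : Nat) : Int) * 2 = (((m + m) * k : Nat) : Int) := by push_cast; ring
      rw [hre, hca]
      refine ih (m + m) (by omega) ?_
      have h2 : (m + m) * k = m * k + m * k := by ring
      omega
    · exact ⟨m, by omega, by simp only [bhDouble, hlen, if_neg hlt]⟩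

-- ===== VERDICT (by name: the statement is the Claim_ definition above) =====
theorem bh_successor_py_spec : Claim_equal_bh_successor_py := by
  intro levels _
  unfold Spec_bh_successor_py bh_successor_py bh_successor_py_alt
  simp only []
  rw [bhScanPQ_eq levels levels.length]
  simp only []
  set pA := bhBreakFind levels (fun v => v > 2)
      (PySem.List.pyRange ((levels.length : Int) - 1) (-1) (-1)) with hpA
  by_cases hp : pA = -1
  · simp [hp]
  · rcases bhScan_spec levels (fun v => (v > 2 : Bool)) levels.length with h | ⟨jp, hj, hjm⟩
    · exact absurd (hpA ▸ h) hp
    rw [← hpA] at hj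
    rw [hj]
    have hne : ((jp : Nat) : Int) ≠ -1 := by omega
    simp only [if_neg hne]
    set qA : Int := bhBreakFind levels
        (fun v => v == PySem.List.pyGetD levels ((jp : Nat) : Int) 0 - 1)
        (PySem.List.pyRange (((jp : Nat) : Int) - 1) (-1) (-1)) with hqA
    have hqb : -1 ≤ qA ∧ qA < (jp : Int) := by
      rcases bhScan_spec levels
          (fun v => (v == PySem.List.pyGetD levels ((jp : Nat) : Int) 0 - 1 : Bool)) jp
        with hq | ⟨jr, hqr, hqm⟩
      · rw [← hqA] at hq; rw [hq]; omega
      · rw [← hqA] at hqr; rw [hqr]; omega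
    rw [bhFill_eq levels jp qA hjm hqb.1 hqb.2]
    set period : List Int := (PySem.List.pyRange qA ((jp : Nat) : Int) 1).map
        (fun j => PySem.List.pyGetD levels j 0) with hper
    set k : Nat := (((jp : Nat) : Int) - qA).toNat with hkdef
    have hkc : ((k : Nat) : Int) = ((jp : Nat) : Int) - qA := by omega
    have hklen : period.length = k := by
      rw [hper, List.length_map, PySem.List.length_pyRange_one]
    have hk1 : 1 ≤ k := by omega
    have hprelen : (levels.take jp).length = jp := by simp [Nat.le_of_lt hjm]
    have hseed : PySem.List.slice levels none (some ((jp : Nat) : Int)) ++ period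
        = levels.take jp ++ (List.replicate 1 period).flatten := by
      rw [PySem.List.slice_to_natCast]; simp
    have ht : ((jp : Nat) : Int) - qA = ((1 * k : Nat) : Int) := by omega
    rw [hseed, ht]
    obtain ⟨m', hcov, heq⟩ := bhDouble_inv (levels.take jp) period k jp levels.length
      hklen hk1 hprelen levels.length 1 le_rfl (by omega)
    rw [heq, PySem.List.slice_to_natCast,
        bhTruncRep (levels.take jp) period k jp levels.length m' hklen hprelen
          (by omega) hcov, hkc]
    rw [ht]
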